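-- pv_equiv track=rewrite | github.com/elixpo/falcon | scripts/update_readme.py | milestone
-- ===== SOURCE A (Python) =====
-- def milestone(count):
--     for threshold, label in [
--         (1000000, "🏔️ ONE MILLION"),
--         (750000, "🔥 750K"),
--         (500000, "⚡ HALF MILLION"),
--         (250000, "🚀 250K"),
--         (100000, "✈️ 100K"),
--         (50000, "🛫 50K"),
--         (10000, "🦅 10K"),
--     ]:
--         if count >= threshold:
--             return label
--     return "🥚 WARMING UP"
-- ===== SOURCE B (Python) =====
-- _THRESHOLDS = [10000, 50000, 100000, 250000, 500000, 750000, 1000000]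
-- _LABELS = ["🦅 10K", "🛫 50K", "✈️ 100K", "🚀 250K",
--            "⚡ HALF MILLION", "🔥 750K", "🏔️ ONE MILLION"]
--
--
-- def milestone(count):
--     # binary search: number of thresholds <= count (bisect_right by hand)
--     lo, hi = 0, len(_THRESHOLDS)
--     while lo < hi:
--         mid = (lo + hi) // 2
--         if count >= _THRESHOLDS[mid]:
--             lo = mid + 1
--         else:
--             hi = mid
--     return "🥚 WARMING UP" if lo == 0 else _LABELS[lo - 1]
-- ===== Notes on version B (the rewrite author's own statement) =====
-- stated objective: alternative
-- what changed: Replaced the linear first-match scan over descending (threshold,label) pairs with a hand-rolled bisect_right binary search over an ascending threshold table plus a parallel label list.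
import Mathlib
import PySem

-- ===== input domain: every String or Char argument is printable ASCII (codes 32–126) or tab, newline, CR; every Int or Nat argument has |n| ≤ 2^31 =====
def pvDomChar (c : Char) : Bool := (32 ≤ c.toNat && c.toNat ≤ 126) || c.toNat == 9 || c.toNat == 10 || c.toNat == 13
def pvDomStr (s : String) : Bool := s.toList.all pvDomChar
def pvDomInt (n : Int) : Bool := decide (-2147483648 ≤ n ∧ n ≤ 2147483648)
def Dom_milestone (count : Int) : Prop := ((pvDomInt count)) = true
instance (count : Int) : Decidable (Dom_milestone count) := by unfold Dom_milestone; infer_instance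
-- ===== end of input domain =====

-- B replaces A's linear first-match scan with a binary search over an ascending threshold table (alternative structure, same result).

-- ===== PORT A =====
-- A's for-loop with early return, as structural recursion over the pair list
def milestoneLoop (count : Int) : List (Int × String) → String
  | [] => "🥚 WARMING UP"
  | (threshold, label) :: rest =>
      if count ≥ threshold then label else milestoneLoop count rest

def milestone (count : Int) : String :=
  milestoneLoop count
    [(1000000, "🏔️ ONE MILLION"),
     (750000, "🔥 750K"),
     (500000, "⚡ HALF MILLION"),
     (250000, "🚀 250K"),
     (100000, "✈️ 100K"),
     (50000, "🛫 50K"),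
     (10000, "🦅 10K")]

-- ===== PORT B =====
def altThresholds : List Int := [10000, 50000, 100000, 250000, 500000, 750000, 1000000]
def altLabels : List String :=
  ["🦅 10K", "🛫 50K", "✈️ 100K", "🚀 250K", "⚡ HALF MILLION", "🔥 750K", "🏔️ ONE MILLION"]

-- the while-loop of Source B (bisect_right by hand), recursion on hi - lo
def altSearch (count : Int) (lo hi : Nat) : Nat :=
  if _h : lo < hi then
    let mid := (lo + hi) / 2
    if count ≥ altThresholds.getD mid 0 then altSearch count (mid + 1) hi
    else altSearch count lo mid
  else lo
termination_by hi - lo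
decreasing_by all_goals omega

def milestone_alt (count : Int) : String :=
  let lo := altSearch count 0 altThresholds.length
  if lo = 0 then "🥚 WARMING UP" else altLabels.getD (lo - 1) ""

-- ===== PRECONDITION & SPEC =====
def Spec_milestone (count : Int) (out : String) : Prop := out = milestone_alt count
instance (count : Int) (out : String) : Decidable (Spec_milestone count out) := by unfold Spec_milestone; infer_instance

-- ===== CLAIM (what is proved, stated in full; the proofs are below) =====
def Claim_equal_milestone : Prop := ∀ (count : Int), Dom_milestone count → Spec_milestone count (milestone count)

-- ===== LEMMAS AND PROOFS =====
-- bottom-up evaluation of the binary search on its concrete (lo, hi) call tree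
theorem altSearch_base (c : Int) (n : Nat) : altSearch c n n = n := by rw [altSearch]; norm_num
theorem altSearch_67 (c : Int) : altSearch c 6 7 = if c ≥ 1000000 then 7 else 6 := by
  rw [altSearch]; norm_num [altThresholds, altSearch_base]
theorem altSearch_45 (c : Int) : altSearch c 4 5 = if c ≥ 500000 then 5 else 4 := by
  rw [altSearch]; norm_num [altThresholds, altSearch_base]
theorem altSearch_23 (c : Int) : altSearch c 2 3 = if c ≥ 100000 then 3 else 2 := by
  rw [altSearch]; norm_num [altThresholds, altSearch_base]
theorem altSearch_01 (c : Int) : altSearch c 0 1 = if c ≥ 10000 then 1 else 0 := by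
  rw [altSearch]; norm_num [altThresholds, altSearch_base]
theorem altSearch_47 (c : Int) : altSearch c 4 7 =
    if c ≥ 750000 then (if c ≥ 1000000 then 7 else 6) else (if c ≥ 500000 then 5 else 4) := by
  rw [altSearch]; norm_num [altThresholds, altSearch_67, altSearch_45]
theorem altSearch_03 (c : Int) : altSearch c 0 3 =
    if c ≥ 50000 then (if c ≥ 100000 then 3 else 2) else (if c ≥ 10000 then 1 else 0) := by
  rw [altSearch]; norm_num [altThresholds, altSearch_23, altSearch_01]
theorem altSearch_07 (c : Int) : altSearch c 0 7 =
    if c ≥ 250000 then (if c ≥ 750000 then (if c ≥ 1000000 then 7 else 6) else (if c ≥ 500000 then 5 else 4))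
    else (if c ≥ 50000 then (if c ≥ 100000 then 3 else 2) else (if c ≥ 10000 then 1 else 0)) := by
  rw [altSearch]; norm_num [altThresholds, altSearch_47, altSearch_03]

theorem milestone_eq_alt (count : Int) : milestone count = milestone_alt count := by
  unfold milestone milestone_alt
  simp only [milestoneLoop]
  norm_num [altThresholds, altLabels, altSearch_07]
  split_ifs <;> first | rfl | omega | exact absurd (by assumption) not_false

-- ===== VERDICT (by name: the statement is the Claim_ definition above) =====
theorem milestone_spec : Claim_equal_milestone := by
  intro count _
  unfold Spec_milestone
  exact milestone_eq_alt count
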